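-- pv_equiv track=rewrite | github.com/nikita-kostylev/federated-est-miner | pm4py/algo/discovery/est_miner/hooks/pre_pruning_strategy.py | _contains_forbidden_sequence
-- ===== SOURCE A (Python) =====
-- def _contains_forbidden_sequence(a, b, trace_bit_map):
--     found_b, found_sequence = False, False
--     for e in trace_bit_map:
--         if e == b:
--             found_b = True
--         if found_b and e == a:
--             found_sequence = True
--     return found_sequence
-- ===== SOURCE B (Python) =====
-- def _contains_forbidden_sequence(a, b, trace_bit_map):
--     seq = list(trace_bit_map)
--     return b in seq and a in seq[seq.index(b):]
-- ===== Notes on version B (the rewrite author's own statement) =====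
-- stated objective: simpler
-- what changed: Replaces the two-flag single-pass state machine with a locate-then-search decomposition: find the first occurrence of b and test membership of a in the suffix from there.
import Mathlib
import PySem

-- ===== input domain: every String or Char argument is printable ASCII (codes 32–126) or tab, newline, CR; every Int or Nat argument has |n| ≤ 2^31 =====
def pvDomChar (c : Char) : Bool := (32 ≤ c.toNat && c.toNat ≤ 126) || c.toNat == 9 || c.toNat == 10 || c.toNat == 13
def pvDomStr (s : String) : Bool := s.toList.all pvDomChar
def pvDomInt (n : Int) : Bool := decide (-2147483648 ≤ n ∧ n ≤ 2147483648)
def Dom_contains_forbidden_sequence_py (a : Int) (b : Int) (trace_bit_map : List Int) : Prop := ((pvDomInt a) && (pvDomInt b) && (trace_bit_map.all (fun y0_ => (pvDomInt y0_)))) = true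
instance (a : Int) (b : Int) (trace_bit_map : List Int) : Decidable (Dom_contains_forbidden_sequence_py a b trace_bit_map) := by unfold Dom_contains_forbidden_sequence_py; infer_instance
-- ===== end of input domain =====

-- B: locate-then-search decomposition (find first b, search a in the suffix) instead of A's two-flag state machine; same behaviour, chosen for simplicity.
-- ===== PORT A =====
-- loop body of A: updates (found_b, found_sequence) for one element e
def pvStepA (a b : Int) (st : Bool × Bool) (e : Int) : Bool × Bool :=
  let found_b := if e == b then true else st.1
  let found_sequence := if found_b && (e == a) then true else st.2
  (found_b, found_sequence)

def contains_forbidden_sequence_py (a : Int) (b : Int) (trace_bit_map : List Int) : Bool :=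
  -- found_b, found_sequence = False, False; for e in trace_bit_map: ...
  (trace_bit_map.foldl (pvStepA a b) (false, false)).2

-- ===== PORT B =====
def contains_forbidden_sequence_py_alt (a : Int) (b : Int) (trace_bit_map : List Int) : Bool :=
  -- seq = list(trace_bit_map) is the identity on List Int; b in seq and a in seq[seq.index(b):]
  trace_bit_map.contains b &&
    (match PySem.List.index? trace_bit_map b with
     | some i => (PySem.List.slice trace_bit_map (some (i : Int)) none).contains a
     | none => false)

-- ===== PRECONDITION & SPEC =====
def Spec_contains_forbidden_sequence_py (a : Int) (b : Int) (trace_bit_map : List Int) (out : Bool) : Prop := out = contains_forbidden_sequence_py_alt a b trace_bit_map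
instance (a : Int) (b : Int) (trace_bit_map : List Int) (out : Bool) : Decidable (Spec_contains_forbidden_sequence_py a b trace_bit_map out) := by unfold Spec_contains_forbidden_sequence_py; infer_instance

-- ===== CLAIM (what is proved, stated in full; the proofs are below) =====
def Claim_equal_contains_forbidden_sequence_py : Prop := ∀ (a : Int) (b : Int) (trace_bit_map : List Int), Dom_contains_forbidden_sequence_py a b trace_bit_map → Spec_contains_forbidden_sequence_py a b trace_bit_map (contains_forbidden_sequence_py a b trace_bit_map)

-- ===== LEMMAS AND PROOFS =====

-- A's fold, once found_b is true, just ORs in whether a appears in the rest.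
theorem foldA_true (a b : Int) (l : List Int) (fs : Bool) :
    l.foldl (pvStepA a b) (true, fs) = (true, fs || l.contains a) := by
  induction l generalizing fs with
  | nil => simp
  | cons e rest ih =>
    have hstep : pvStepA a b (true, fs) e = (true, fs || (e == a)) := by
      simp [pvStepA]; by_cases h : e = a <;> simp [h]
    rw [List.foldl_cons, hstep, ih]
    have hb : (e == a) = decide (a = e) := by
      by_cases ha : e = a
      · simp [ha]
      · simp [ha, (Ne.symm ha : a ≠ e)]
    rw [hb]
    simp [Bool.or_assoc]

-- B on a list starting with b: the suffix from the first b is the whole list.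
theorem alt_head (a b : Int) (rest : List Int) :
    contains_forbidden_sequence_py_alt a b (b :: rest) = (b :: rest).contains a := by
  unfold contains_forbidden_sequence_py_alt
  simp only [PySem.List.index?_cons_self]
  simp [PySem.List.slice_none_none]

-- B ignores a head that is not b.
theorem alt_ne (a b e : Int) (rest : List Int) (he : e ≠ b) :
    contains_forbidden_sequence_py_alt a b (e :: rest) = contains_forbidden_sequence_py_alt a b rest := by
  have hcons : PySem.List.index? (e :: rest) b = (PySem.List.index? rest b).map (· + 1) :=
    PySem.List.index?_cons_of_ne rest he
  unfold contains_forbidden_sequence_py_alt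
  rw [hcons]
  cases hidx : PySem.List.index? rest b with
  | none =>
    have hnb : b ∉ rest := (PySem.List.index?_eq_none_iff rest b).mp hidx
    simp [hnb]
  | some i =>
    have hib : b ∈ rest := (PySem.List.index?_isSome_iff rest b).mp (by rw [hidx]; rfl)
    have h1 : PySem.List.slice (e :: rest) (some (((i + 1 : Nat)) : Int)) none
        = PySem.List.slice rest (some (i : Int)) none := by
      rw [PySem.List.slice_from_natCast, PySem.List.slice_from_natCast]
      simp
    simp only [Option.map_some]
    simp only [Nat.cast_add, Nat.cast_one] at h1
    push_cast
    rw [h1]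
    simp [hib]

theorem main_equiv (a b : Int) (l : List Int) :
    contains_forbidden_sequence_py a b l = contains_forbidden_sequence_py_alt a b l := by
  induction l with
  | nil => simp [contains_forbidden_sequence_py, contains_forbidden_sequence_py_alt]
  | cons e rest ih =>
    by_cases he : e = b
    · subst he
      rw [alt_head]
      unfold contains_forbidden_sequence_py
      have hstep : pvStepA a e (false, false) e = (true, decide (e = a)) := by
        simp [pvStepA]
      rw [List.foldl_cons, hstep, foldA_true]
      by_cases ha : e = a
      · simp [ha]
      · simp [ha, (Ne.symm ha : a ≠ e)]
    · rw [alt_ne a b e rest he, ← ih]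
      unfold contains_forbidden_sequence_py
      have hstep : pvStepA a b (false, false) e = (false, false) := by
        simp [pvStepA, he]
      rw [List.foldl_cons, hstep]

-- ===== VERDICT (by name: the statement is the Claim_ definition above) =====
theorem contains_forbidden_sequence_py_spec : Claim_equal_contains_forbidden_sequence_py := by
  intro a b l _
  unfold Spec_contains_forbidden_sequence_py
  exact main_equiv a b l
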